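-- pv_equiv track=rewrite | github.com/hulahula3247/CSE4152-exam | f1-ahead-subarrays/main.py | solve2
-- ===== SOURCE A (Python) =====
-- def solve2(N, K, A, B):
--
--     preA = [0]*(N+1)
--     preB = [0]*(N+1)
--     for i in range(N):
--         preA[i+1] = preA[i] + A[i]
--         preB[i+1] = preB[i] + B[i]
--
--     ans = -int(1e18)
--     for a in range(N-K+1):
--         sumA = preA[a+K] - preA[a]
--         for b in range(a+1, N-K+1):
--             sumB = preB[b+K] - preB[b]
--             ans = max(ans, sumA + sumB)
--     return ans
-- ===== SOURCE B (Python) =====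
-- def solve2(N, K, A, B):
--     # O(N): sliding-window sums + single backward pass keeping the running
--     # maximum of B-window sums to the right of the current A-window.
--     ans = -int(1e18)
--     M = N - K + 1          # number of window start positions
--     if M < 2:
--         return ans
--     sa = sum(A[:K])
--     sb = sum(B[:K])
--     w = [(sa, sb)]
--     for i in range(1, M):
--         sa += A[i + K - 1] - A[i - 1]
--         sb += B[i + K - 1] - B[i - 1]
--         w.append((sa, sb))
--     best = w[M - 1][1]
--     for a in range(M - 2, -1, -1):
--         ans = max(ans, w[a][0] + best)
--         best = max(best, w[a][1])
--     return ans
-- ===== Notes on version B (the rewrite author's own statement) =====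
-- stated objective: faster
-- what changed: replaced A's O(N^2) double loop over ordered window pairs by O(N) sliding-window sums plus one backward pass that keeps the running maximum of B-window sums to the right of the current A-window
import Mathlib
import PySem

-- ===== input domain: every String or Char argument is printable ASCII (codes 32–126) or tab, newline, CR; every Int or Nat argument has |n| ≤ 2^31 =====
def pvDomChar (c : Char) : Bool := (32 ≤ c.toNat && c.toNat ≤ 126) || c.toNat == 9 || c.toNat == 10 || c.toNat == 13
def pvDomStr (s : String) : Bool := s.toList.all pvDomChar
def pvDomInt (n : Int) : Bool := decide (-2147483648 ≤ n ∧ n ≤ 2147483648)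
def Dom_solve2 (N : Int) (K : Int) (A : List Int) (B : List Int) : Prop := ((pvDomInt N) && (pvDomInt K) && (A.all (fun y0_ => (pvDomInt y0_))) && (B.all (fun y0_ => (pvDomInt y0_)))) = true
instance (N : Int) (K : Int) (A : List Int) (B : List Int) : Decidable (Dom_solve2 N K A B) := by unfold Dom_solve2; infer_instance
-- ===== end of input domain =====

-- B replaces A's O(N^2) double loop by sliding-window sums and one backward pass
-- with a running suffix maximum of the B-window sums (objective: faster).

-- ===== PORT A =====
def solve2 (N : Int) (K : Int) (A : List Int) (B : List Int) : Int :=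
  let pre0 : List Int := List.replicate (N + 1).toNat 0
  let p : List Int × List Int :=
    (PySem.List.pyRange 0 N 1).foldl
      (fun (p : List Int × List Int) i =>
        (p.1.set (i + 1).toNat (PySem.List.pyGetD p.1 i 0 + PySem.List.pyGetD A i 0),
         p.2.set (i + 1).toNat (PySem.List.pyGetD p.2 i 0 + PySem.List.pyGetD B i 0)))
      (pre0, pre0)
  (PySem.List.pyRange 0 (N - K + 1) 1).foldl
    (fun ans a =>
      let sumA := PySem.List.pyGetD p.1 (a + K) 0 - PySem.List.pyGetD p.1 a 0
      (PySem.List.pyRange (a + 1) (N - K + 1) 1).foldl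
        (fun ans b =>
          let sumB := PySem.List.pyGetD p.2 (b + K) 0 - PySem.List.pyGetD p.2 b 0
          max ans (sumA + sumB)) ans)
    (-1000000000000000000)

-- ===== PORT B =====
def solve2_alt (N : Int) (K : Int) (A : List Int) (B : List Int) : Int :=
  let ans : Int := -1000000000000000000
  let M := N - K + 1
  if M < 2 then ans
  else
    let sa := (PySem.List.slice A none (some K)).sum
    let sb := (PySem.List.slice B none (some K)).sum
    let st : Int × Int × List (Int × Int) :=
      (PySem.List.pyRange 1 M 1).foldl
        (fun (st : Int × Int × List (Int × Int)) i =>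
          let sa' := st.1 + PySem.List.pyGetD A (i + K - 1) 0 - PySem.List.pyGetD A (i - 1) 0
          let sb' := st.2.1 + PySem.List.pyGetD B (i + K - 1) 0 - PySem.List.pyGetD B (i - 1) 0
          (sa', sb', st.2.2 ++ [(sa', sb')]))
        (sa, sb, [(sa, sb)])
    let w := st.2.2
    let best := (PySem.List.pyGetD w (M - 1) (0, 0)).2
    let r : Int × Int :=
      (PySem.List.pyRange (M - 2) (-1) (-1)).foldl
        (fun (st : Int × Int) a =>
          (max st.1 ((PySem.List.pyGetD w a (0, 0)).1 + st.2),
           max st.2 (PySem.List.pyGetD w a (0, 0)).2))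
        (ans, best)
    r.1

-- ===== PRECONDITION & SPEC =====
-- Pre_ is exactly the set of inputs on which A returns: outside it A raises
-- IndexError (N larger than a list, or a negative K whose wrapped prefix index
-- leaves the prefix array), so nothing returned by A is excluded.
def Pre_solve2 (N : Int) (K : Int) (A : List Int) (B : List Int) : Prop :=
  N ≤ A.length ∧ N ≤ B.length ∧ (0 ≤ K ∨ N < K)
instance (N : Int) (K : Int) (A : List Int) (B : List Int) : Decidable (Pre_solve2 N K A B) := by
  unfold Pre_solve2; infer_instance
def pvWitness_solve2 : Int × Int × List Int × List Int := (3, 1, [1, 2, 3], [4, 5, 6])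

def Spec_solve2 (N : Int) (K : Int) (A : List Int) (B : List Int) (out : Int) : Prop := out = solve2_alt N K A B
instance (N : Int) (K : Int) (A : List Int) (B : List Int) (out : Int) : Decidable (Spec_solve2 N K A B out) := by unfold Spec_solve2; infer_instance

-- ===== CLAIM (what is proved, stated in full; the proofs are below) =====
def Claim_equal_solve2 : Prop := ∀ (N : Int) (K : Int) (A : List Int) (B : List Int), Dom_solve2 N K A B → Pre_solve2 N K A B → Spec_solve2 N K A B (solve2 N K A B)

-- ===== LEMMAS AND PROOFS =====

def pvP (xs : List Int) (j : ℕ) : Int := (xs.take j).sum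
def pvS (xs : List Int) (K b : Int) : Int := pvP xs (b + K).toNat - pvP xs b.toNat
def pvSuf (f : Int → Int) (t M : Int) : Int :=
  ((PySem.List.pyRange t M 1).map f).foldr max (f (M - 1))
def pvLOW : Int := -1000000000000000000
def pvCommon (N K : Int) (A B : List Int) : Int :=
  (PySem.List.pyRange 0 (N - K) 1).foldl
    (fun ans a => max ans (pvS A K a + pvSuf (pvS B K) (a + 1) (N - K + 1))) pvLOW

theorem pvSuf_last (f : Int → Int) (M : Int) : pvSuf f (M - 1) M = f (M - 1) := by
  have h : PySem.List.pyRange (M - 1) M 1 = [M - 1] := by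
    have := PySem.List.pyRange_one_singleton (M - 1)
    simpa [show M - 1 + 1 = M by ring] using this
  simp [pvSuf, h]

theorem pvSuf_cons (f : Int → Int) (t M : Int) (h : t < M) :
    pvSuf f t M = max (f t) (pvSuf f (t + 1) M) := by
  rw [pvSuf, PySem.List.pyRange_one_cons h, List.map_cons, List.foldr_cons]; rfl

theorem pvS_slide (xs : List Int) (K : Int) (c : ℕ) (hK : 0 ≤ K)
    (h : (c : Int) + K < xs.length) :
    pvS xs K ((c : Int) + 1) =
      pvS xs K (c : Int) + PySem.List.pyGetD xs ((c : Int) + K) 0 - PySem.List.pyGetD xs (c : Int) 0 := by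
  have hc : (c : Int) < xs.length := by omega
  have hcn : c < xs.length := by exact_mod_cast hc
  have hckn : (((c : Int) + K).toNat) < xs.length := by omega
  rw [PySem.List.pyGetD_eq_getElem xs 0 (by omega) h,
      PySem.List.pyGetD_eq_getElem xs 0 (by omega) hc]
  have e1 : ((c : Int) + 1 + K).toNat = ((c : Int) + K).toNat + 1 := by omega
  have e2 : ((c : Int) + 1).toNat = c + 1 := by omega
  have e3 : ((c : Int)).toNat = c := by omega
  unfold pvS
  simp only [e1, e2, e3]
  unfold pvP
  rw [List.sum_take_succ _ _ hckn, List.sum_take_succ _ _ hcn]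
  ring

-- fold of max over a nonempty range equals max with the suffix maximum
theorem pv_inner_fold (f : Int → Int) (M : Int) :
    ∀ cnt : ℕ, ∀ t acc c : Int, t = M - cnt → 1 ≤ cnt →
    (PySem.List.pyRange t M 1).foldl (fun acc b => max acc (c + f b)) acc
      = max acc (c + pvSuf f t M) := by
  intro cnt
  induction cnt with
  | zero => omega
  | succ n ih =>
    intro t acc c ht _
    by_cases hn : n = 0
    · subst hn
      have ht1 : t = M - 1 := by omega
      subst ht1
      have h : PySem.List.pyRange (M - 1) M 1 = [M - 1] := by
        have := PySem.List.pyRange_one_singleton (M - 1)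
        simpa [show M - 1 + 1 = M by ring] using this
      simp [h, pvSuf_last]
    · have htM : t < M := by omega
      rw [PySem.List.pyRange_one_cons htM, List.foldl_cons,
          ih (t + 1) (max acc (c + f t)) c (by omega) (by omega),
          max_assoc, max_add_add_left, ← pvSuf_cons f t M htM]

theorem pv_foldl_out {g : Int → Int → Int} (hg : ∀ a x y, g (g a x) y = g (g a y) x) :
    ∀ (l : List Int) (init x : Int), l.foldl g (g init x) = g (l.foldl g init) x := by
  intro l
  induction l with
  | nil => intro init x; rfl
  | cons y l ih => intro init x; simp only [List.foldl_cons]; rw [hg, ih]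

theorem pv_foldl_reverse {g : Int → Int → Int} (hg : ∀ a x y, g (g a x) y = g (g a y) x) :
    ∀ (l : List Int) (init : Int), l.reverse.foldl g init = l.foldl g init := by
  intro l
  induction l with
  | nil => intro init; rfl
  | cons x l ih =>
    intro init
    simp only [List.reverse_cons, List.foldl_append, List.foldl_cons, List.foldl_nil]
    rw [ih, ← pv_foldl_out hg]

def pvBuild (A B : List Int) (N : Int) (c : ℕ) : List Int × List Int :=
  (PySem.List.pyRange 0 (c : Int) 1).foldl
    (fun (p : List Int × List Int) i =>
      (p.1.set (i + 1).toNat (PySem.List.pyGetD p.1 i 0 + PySem.List.pyGetD A i 0),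
       p.2.set (i + 1).toNat (PySem.List.pyGetD p.2 i 0 + PySem.List.pyGetD B i 0)))
    (List.replicate (N + 1).toNat 0, List.replicate (N + 1).toNat 0)

theorem pvBuild_succ (A B : List Int) (N : Int) (c : ℕ) :
    pvBuild A B N (c + 1) =
      ((pvBuild A B N c).1.set ((c : Int) + 1).toNat
          (PySem.List.pyGetD (pvBuild A B N c).1 (c : Int) 0 + PySem.List.pyGetD A (c : Int) 0),
       (pvBuild A B N c).2.set ((c : Int) + 1).toNat
          (PySem.List.pyGetD (pvBuild A B N c).2 (c : Int) 0 + PySem.List.pyGetD B (c : Int) 0)) := by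
  unfold pvBuild
  rw [show ((c + 1 : ℕ) : Int) = (c : Int) + 1 by push_cast; ring,
      PySem.List.pyRange_one_succ_right (a := 0) (b := (c : Int)) (by positivity), List.foldl_append]
  rfl

theorem pvBuild_spec (A B : List Int) (N : Int) (hA : N ≤ A.length) (hB : N ≤ B.length)
    (hN : 0 ≤ N) :
    ∀ c : ℕ, (c : Int) ≤ N →
      (pvBuild A B N c).1.length = (N + 1).toNat ∧ (pvBuild A B N c).2.length = (N + 1).toNat ∧
        ∀ j : ℕ, j ≤ c →
          (pvBuild A B N c).1[j]? = some (pvP A j) ∧ (pvBuild A B N c).2[j]? = some (pvP B j) := by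
  intro c
  induction c with
  | zero =>
    intro _
    have h0 : PySem.List.pyRange 0 ((0 : ℕ) : Int) 1 = [] := by
      simpa using PySem.List.pyRange_one_eq_nil (le_refl 0)
    refine ⟨?_, ?_, ?_⟩ <;>
      simp_all [pvBuild, pvP, show (0 : ℕ) < (N + 1).toNat by omega]
  | succ c ih =>
    intro hc
    obtain ⟨hl1, hl2, hidx⟩ := ih (by omega)
    have hcA : c < A.length := by omega
    have hcB : c < B.length := by omega
    have hget1 : PySem.List.pyGetD (pvBuild A B N c).1 (c : Int) 0 = pvP A c := by
      rw [PySem.List.pyGetD_natCast, List.getD_eq_getElem?_getD, (hidx c le_rfl).1]; rfl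
    have hget2 : PySem.List.pyGetD (pvBuild A B N c).2 (c : Int) 0 = pvP B c := by
      rw [PySem.List.pyGetD_natCast, List.getD_eq_getElem?_getD, (hidx c le_rfl).2]; rfl
    have hgA : PySem.List.pyGetD A (c : Int) 0 = A[c] := by
      rw [PySem.List.pyGetD_natCast, List.getD_eq_getElem?_getD, List.getElem?_eq_getElem hcA]; rfl
    have hgB : PySem.List.pyGetD B (c : Int) 0 = B[c] := by
      rw [PySem.List.pyGetD_natCast, List.getD_eq_getElem?_getD, List.getElem?_eq_getElem hcB]; rfl
    have htn : ((c : Int) + 1).toNat = c + 1 := by omega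
    have hlen : c + 1 < (N + 1).toNat := by omega
    rw [pvBuild_succ, hget1, hget2, hgA, hgB, htn]
    refine ⟨by simpa using hl1, by simpa using hl2, ?_⟩
    intro j hj
    by_cases hj' : j = c + 1
    · subst hj'
      constructor <;>
        · rw [List.getElem?_set]
          simp [hl1, hl2, hlen, pvP, List.sum_take_succ _ _ hcA,
            List.sum_take_succ _ _ hcB]
    · have hj'' : j ≤ c := by omega
      refine ⟨?_, ?_⟩ <;> rw [List.getElem?_set, if_neg (by omega)]
      · exact (hidx j hj'').1
      · exact (hidx j hj'').2

theorem pv_solve2_eq_common (N K : Int) (A B : List Int) (hA : N ≤ A.length)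
    (hB : N ≤ B.length) (hK : 0 ≤ K) (hM : 2 ≤ N - K + 1) :
    solve2 N K A B = pvCommon N K A B := by
  have hN : 0 ≤ N := by omega
  have hfold :
      (PySem.List.pyRange 0 N 1).foldl
        (fun (p : List Int × List Int) i =>
          (p.1.set (i + 1).toNat (PySem.List.pyGetD p.1 i 0 + PySem.List.pyGetD A i 0),
           p.2.set (i + 1).toNat (PySem.List.pyGetD p.2 i 0 + PySem.List.pyGetD B i 0)))
        (List.replicate (N + 1).toNat 0, List.replicate (N + 1).toNat 0)
        = pvBuild A B N N.toNat := by
    unfold pvBuild; rw [Int.toNat_of_nonneg hN]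
  obtain ⟨hl1, hl2, hidx⟩ := pvBuild_spec A B N hA hB hN N.toNat (by omega)
  have hget1 : ∀ j : Int, 0 ≤ j → j ≤ N →
      PySem.List.pyGetD (pvBuild A B N N.toNat).1 j 0 = pvP A j.toNat := by
    intro j h0 h1
    have hb : j.toNat < (pvBuild A B N N.toNat).1.length := by rw [hl1]; omega
    have hx := (hidx j.toNat (by omega)).1
    rw [List.getElem?_eq_getElem hb] at hx
    rw [PySem.List.pyGetD_eq_getElem _ 0 h0 (by rw [hl1]; push_cast; omega)]
    exact Option.some.inj hx
  have hget2 : ∀ j : Int, 0 ≤ j → j ≤ N →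
      PySem.List.pyGetD (pvBuild A B N N.toNat).2 j 0 = pvP B j.toNat := by
    intro j h0 h1
    have hb : j.toNat < (pvBuild A B N N.toNat).2.length := by rw [hl2]; omega
    have hx := (hidx j.toNat (by omega)).2
    rw [List.getElem?_eq_getElem hb] at hx
    rw [PySem.List.pyGetD_eq_getElem _ 0 h0 (by rw [hl2]; push_cast; omega)]
    exact Option.some.inj hx
  simp only [solve2, hfold]
  rw [show PySem.List.pyRange 0 (N - K + 1) 1 = PySem.List.pyRange 0 (N - K) 1 ++ [N - K] from
        PySem.List.pyRange_one_succ_right (by omega),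
      List.foldl_append, List.foldl_cons, List.foldl_nil,
      PySem.List.pyRange_one_eq_nil (le_refl (N - K + 1)), List.foldl_nil]
  unfold pvCommon pvLOW
  apply PySem.List.foldl_congr_mem
  intro acc a ha
  obtain ⟨ha0, ha1⟩ := (PySem.List.mem_pyRange_one).1 ha
  rw [PySem.List.foldl_congr_mem _ _
        (fun ans b => max ans (pvS A K a + pvS B K b)) _ ?_]
  · exact pv_inner_fold (pvS B K) (N - K + 1) (N - K - a).toNat (a + 1) acc (pvS A K a)
      (by omega) (by omega)
  · intro acc' b hb
    obtain ⟨hb0, hb1⟩ := (PySem.List.mem_pyRange_one).1 hb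
    rw [hget1 (a + K) (by omega) (by omega), hget1 a (by omega) (by omega),
        hget2 (b + K) (by omega) (by omega), hget2 b (by omega) (by omega)]
    rfl

theorem pv_build_loop (N K : Int) (A B : List Int) (hA : N ≤ A.length) (hB : N ≤ B.length)
    (hK : 0 ≤ K) :
    ∀ c : ℕ, (c : Int) ≤ N - K →
      (PySem.List.pyRange 1 (1 + (c : Int)) 1).foldl
        (fun (st : Int × Int × List (Int × Int)) i =>
          let sa' := st.1 + PySem.List.pyGetD A (i + K - 1) 0 - PySem.List.pyGetD A (i - 1) 0
          let sb' := st.2.1 + PySem.List.pyGetD B (i + K - 1) 0 - PySem.List.pyGetD B (i - 1) 0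
          (sa', sb', st.2.2 ++ [(sa', sb')]))
        (pvS A K 0, pvS B K 0, [(pvS A K 0, pvS B K 0)])
      = (pvS A K (c : Int), pvS B K (c : Int),
         (PySem.List.pyRange 0 ((c : Int) + 1) 1).map (fun a => (pvS A K a, pvS B K a))) := by
  intro c
  induction c with
  | zero =>
    intro _
    rw [show ((0 : ℕ) : Int) = 0 by norm_num]
    rw [PySem.List.pyRange_one_eq_nil (by omega), List.foldl_nil]
    rw [show (0 : Int) + 1 = 0 + 1 by ring, PySem.List.pyRange_one_singleton, List.map_cons]
    rfl
  | succ c ih =>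
    intro hc
    have hcast : ((c + 1 : ℕ) : Int) = (c : Int) + 1 := by push_cast; ring
    rw [hcast,
        show (1 : Int) + ((c : Int) + 1) = (1 + (c : Int)) + 1 by ring,
        PySem.List.pyRange_one_succ_right (by omega), List.foldl_append,
        ih (by omega), List.foldl_cons, List.foldl_nil]
    have e1 : (1 + (c : Int)) + K - 1 = (c : Int) + K := by ring
    have e2 : (1 + (c : Int)) - 1 = (c : Int) := by ring
    have hsA := pvS_slide A K c hK (by omega)
    have hsB := pvS_slide B K c hK (by omega)
    simp only [e1, e2, ← hsA, ← hsB]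
    conv_rhs => rw [PySem.List.pyRange_one_succ_right (show (0 : Int) ≤ (c : Int) + 1 by omega),
      List.map_append]
    rfl

theorem pv_backward (fA fB : Int → Int) (M : Int) :
    ∀ cnt : ℕ, ∀ t ansAcc : Int, t = (cnt : Int) - 1 → t ≤ M - 2 →
      ((PySem.List.pyRange t (-1) (-1)).foldl
        (fun (st : Int × Int) a =>
          (max st.1 ((PySem.List.pyGetD ((PySem.List.pyRange 0 M 1).map
              (fun x => (fA x, fB x))) a ((0 : Int), (0 : Int))).1 + st.2),
           max st.2 (PySem.List.pyGetD ((PySem.List.pyRange 0 M 1).map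
              (fun x => (fA x, fB x))) a ((0 : Int), (0 : Int))).2))
        (ansAcc, pvSuf fB (t + 1) M)).1
      = (PySem.List.pyRange t (-1) (-1)).foldl
          (fun acc a => max acc (fA a + pvSuf fB (a + 1) M)) ansAcc := by
  intro cnt
  induction cnt with
  | zero =>
    intro t ansAcc ht _
    rw [PySem.List.pyRange_neg_one_eq_nil (by omega), List.foldl_nil, List.foldl_nil]
  | succ n ih =>
    intro t ansAcc ht htM
    have ht0 : -1 < t := by omega
    rw [PySem.List.pyRange_neg_one_cons ht0, List.foldl_cons, List.foldl_cons]
    have hw : PySem.List.pyGetD ((PySem.List.pyRange 0 M 1).map (fun x => (fA x, fB x))) t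
        ((0 : Int), (0 : Int)) = (fA t, fB t) :=
      PySem.List.pyGetD_map_pyRange_of_nonneg _ M t _ (by omega) (by omega)
    have hsuf : max (pvSuf fB (t + 1) M) (fB t) = pvSuf fB t M := by
      rw [pvSuf_cons fB t M (by omega), max_comm]
    have hsuf' : max (pvSuf fB (t + 1) M) (fB t) = pvSuf fB ((t - 1) + 1) M := by
      rw [show (t - 1) + 1 = t by ring]; exact hsuf
    simp only [hw, hsuf']
    exact ih (t - 1) _ (by omega) (by omega)

theorem pv_alt_eq_common (N K : Int) (A B : List Int) (hA : N ≤ A.length)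
    (hB : N ≤ B.length) (hK : 0 ≤ K) (hM : 2 ≤ N - K + 1) :
    solve2_alt N K A B = pvCommon N K A B := by
  have hMge : ¬ (N - K + 1 < 2) := by omega
  have hsa : (PySem.List.slice A none (some K)).sum = pvS A K 0 := by
    rw [PySem.List.slice_to A hK]; simp [pvS, pvP]
  have hsb : (PySem.List.slice B none (some K)).sum = pvS B K 0 := by
    rw [PySem.List.slice_to B hK]; simp [pvS, pvP]
  simp only [solve2_alt, hMge, if_false]
  rw [hsa, hsb,
      show PySem.List.pyRange 1 (N - K + 1) 1
         = PySem.List.pyRange 1 (1 + (((N - K).toNat : ℕ) : Int)) 1 by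
        rw [show (1 : Int) + (((N - K).toNat : ℕ) : Int) = N - K + 1 by omega],
      pv_build_loop N K A B hA hB hK (N - K).toNat (by omega),
      show ((((N - K).toNat : ℕ)) : Int) = N - K by omega]
  simp only []
  rw [show N - K + 1 - 1 = N - K by ring, show N - K + 1 - 2 = N - K - 1 by ring,
      PySem.List.pyGetD_map_pyRange_of_nonneg _ (N - K + 1) (N - K) _ (by omega) (by omega)]
  simp only []
  rw [show pvS B K (N - K) = pvSuf (pvS B K) ((N - K - 1) + 1) (N - K + 1) by
        rw [show N - K - 1 + 1 = N - K + 1 - 1 by ring, pvSuf_last,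
            show N - K + 1 - 1 = N - K by ring],
      pv_backward (pvS A K) (pvS B K) (N - K + 1) (N - K).toNat (N - K - 1) _
        (by omega) (by omega),
      PySem.List.pyRange_neg_one_eq_reverse,
      show (-1 : Int) + 1 = 0 by ring, show N - K - 1 + 1 = N - K by ring,
      pv_foldl_reverse (g := fun acc a => max acc (pvS A K a + pvSuf (pvS B K) (a + 1) (N - K + 1)))
        (fun a x y => max_right_comm _ _ _)]
  rfl

theorem pv_degenerate (N K : Int) (A B : List Int) (h : N - K + 1 < 2) :
    solve2 N K A B = -1000000000000000000 := by
  simp only [solve2]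
  by_cases h0 : N - K + 1 ≤ 0
  · rw [PySem.List.pyRange_one_eq_nil h0, List.foldl_nil]
  · have h1 : N - K + 1 = 1 := by omega
    have hr : PySem.List.pyRange 0 (N - K + 1) 1 = [0] := by
      rw [h1]; simpa using PySem.List.pyRange_one_singleton 0
    rw [hr, List.foldl_cons, h1,
        PySem.List.pyRange_one_eq_nil (show (1 : Int) ≤ 0 + 1 by omega),
        List.foldl_nil, List.foldl_nil]

-- ===== VERDICT (by name: the statement is the Claim_ definition above) =====
theorem solve2_spec : Claim_equal_solve2 := by
  unfold Claim_equal_solve2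
  intro N K A B _ hpre
  obtain ⟨hA, hB, hk⟩ := hpre
  unfold Spec_solve2
  by_cases h : N - K + 1 < 2
  · rw [pv_degenerate N K A B h]
    simp only [solve2_alt]
    rw [if_pos h]
  · have hK : 0 ≤ K := by
      cases hk with
      | inl hk => exact hk
      | inr hk => omega
    rw [pv_solve2_eq_common N K A B hA hB hK (by omega),
        pv_alt_eq_common N K A B hA hB hK (by omega)]
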